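-- pv_equiv track=rewrite | github.com/Safihatech/Exam-Seating-Plan-Generator | backend/utils/seating.py | pick_next_branch
-- ===== SOURCE A (Python) =====
-- def pick_next_branch(branches, branch_queues, start_idx, disallowed):
--     if not branches:
--         return None, start_idx
--     total = len(branches)
--     idx = start_idx % total
--     fallback = None
--     fallback_idx = None
--     checked = 0
--
--     while checked < total:
--         branch = branches[idx]
--         if branch_queues[branch]:
--             if branch not in disallowed:
--                 return branch, (idx + 1) % total
--             if fallback is None:
--                 fallback = branch
--                 fallback_idx = idx
--         idx = (idx + 1) % total
--         checked += 1
--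
--     if fallback is not None:
--         return fallback, (fallback_idx + 1) % total
--     return None, start_idx
-- ===== SOURCE B (Python) =====
-- def pick_next_branch(branches, branch_queues, start_idx, disallowed):
--     if not branches:
--         return None, start_idx
--     total = len(branches)
--     order = [(start_idx + i) % total for i in range(total)]
--     # first pass: first non-empty branch that is allowed
--     for i in order:
--         b = branches[i]
--         if branch_queues[b] and b not in disallowed:
--             return b, (i + 1) % total
--     # second pass: fallback = first non-empty branch in scan order
--     for i in order:
--         b = branches[i]
--         if branch_queues[b]:
--             return b, (i + 1) % total
--     return None, start_idx
-- ===== Notes on version B (the rewrite author's own statement) =====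
-- stated objective: simpler
-- what changed: Replaces the single fuel-counted while loop with mutable fallback/fallback_idx state by a precomputed rotated index order and two independent stateless linear searches (allowed-and-non-empty, then merely non-empty).
import Mathlib
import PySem

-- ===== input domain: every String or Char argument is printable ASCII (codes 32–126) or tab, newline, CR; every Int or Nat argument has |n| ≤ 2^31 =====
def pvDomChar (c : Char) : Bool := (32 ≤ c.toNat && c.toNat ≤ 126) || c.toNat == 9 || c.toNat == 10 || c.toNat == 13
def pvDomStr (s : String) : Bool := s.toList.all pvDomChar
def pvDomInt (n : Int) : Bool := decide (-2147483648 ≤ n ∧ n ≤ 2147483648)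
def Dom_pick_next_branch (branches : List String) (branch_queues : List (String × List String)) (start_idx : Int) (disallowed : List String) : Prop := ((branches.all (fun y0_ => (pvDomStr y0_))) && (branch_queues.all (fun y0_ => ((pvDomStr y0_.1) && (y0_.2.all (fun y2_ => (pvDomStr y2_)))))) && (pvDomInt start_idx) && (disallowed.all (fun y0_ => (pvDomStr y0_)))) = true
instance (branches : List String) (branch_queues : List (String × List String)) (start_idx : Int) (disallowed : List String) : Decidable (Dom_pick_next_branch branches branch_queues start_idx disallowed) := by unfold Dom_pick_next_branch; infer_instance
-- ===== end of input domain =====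

-- ===== PORT A =====
-- Header: B replaces A's single stateful round-robin loop by a precomputed rotated index
-- order scanned twice (allowed pass, then fallback pass); same return value, objective: simpler.

-- A's while loop: fuel = total - checked; state = (idx, fallback); branches[idx] is always in
-- range (idx ∈ [0,total)), so pyGet? … |>.getD "" is exact; the dict lookup's KeyError case is
-- excluded by Pre_ (getD [] is only reached with the key present there).
def pickLoopA (branches : List String) (branch_queues : List (String × List String))
    (disallowed : List String) (total start_idx : Int) :
    Nat → Int → Option (String × Int) → Option String × Int
  | 0, _, fb =>
      match fb with
      | some (f, fi) => (some f, PySem.Int.mod (fi + 1) total)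
      | none => (none, start_idx)
  | checked + 1, idx, fb =>
      let branch := (PySem.List.pyGet? branches idx).getD ""
      if (PySem.Dict.mk branch_queues).getD branch [] ≠ [] then
        if ¬ disallowed.contains branch then
          (some branch, PySem.Int.mod (idx + 1) total)
        else
          let fb' := match fb with
            | none => some (branch, idx)
            | some p => some p
          pickLoopA branches branch_queues disallowed total start_idx checked
            (PySem.Int.mod (idx + 1) total) fb'
      else
        pickLoopA branches branch_queues disallowed total start_idx checked
          (PySem.Int.mod (idx + 1) total) fb

def pick_next_branch (branches : List String) (branch_queues : List (String × List String)) (start_idx : Int) (disallowed : List String) : Option String × Int :=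
  if branches = [] then (none, start_idx)
  else
    let total : Int := branches.length
    pickLoopA branches branch_queues disallowed total start_idx branches.length
      (PySem.Int.mod start_idx total) none

-- ===== PORT B =====
-- first pass: first index (in order) whose branch is non-empty and allowed
def pickPass1 (branches : List String) (branch_queues : List (String × List String))
    (disallowed : List String) (total : Int) : List Int → Option (String × Int)
  | [] => none
  | i :: rest =>
      let b := (PySem.List.pyGet? branches i).getD ""
      if (PySem.Dict.mk branch_queues).getD b [] ≠ [] ∧ ¬ disallowed.contains b then
        some (b, PySem.Int.mod (i + 1) total)
      else pickPass1 branches branch_queues disallowed total rest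

-- second pass: first index whose branch is merely non-empty
def pickPass2 (branches : List String) (branch_queues : List (String × List String))
    (total : Int) : List Int → Option (String × Int)
  | [] => none
  | i :: rest =>
      let b := (PySem.List.pyGet? branches i).getD ""
      if (PySem.Dict.mk branch_queues).getD b [] ≠ [] then
        some (b, PySem.Int.mod (i + 1) total)
      else pickPass2 branches branch_queues total rest

def pick_next_branch_alt (branches : List String) (branch_queues : List (String × List String)) (start_idx : Int) (disallowed : List String) : Option String × Int :=
  if branches = [] then (none, start_idx)
  else
    let total : Int := branches.length
    let order := (PySem.List.pyRange 0 total 1).map (fun i => PySem.Int.mod (start_idx + i) total)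
    match pickPass1 branches branch_queues disallowed total order with
    | some (b, j) => (some b, j)
    | none =>
      match pickPass2 branches branch_queues total order with
      | some (b, j) => (some b, j)
      | none => (none, start_idx)

-- ===== PRECONDITION & SPEC =====
-- Pre_ excludes exactly the inputs on which Python raises KeyError: those where the round-robin
-- scan reaches an index whose branch name is missing from branch_queues before any index with a
-- present, non-empty, allowed branch would have ended the scan.
def Pre_pick_next_branch (branches : List String) (branch_queues : List (String × List String)) (start_idx : Int) (disallowed : List String) : Prop :=
  branches = [] ∨
  ∀ p ∈ PySem.List.pyRange 0 branches.length 1,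
    ((PySem.Dict.mk branch_queues).get?
        ((PySem.List.pyGet? branches (PySem.Int.mod (start_idx + p) branches.length)).getD "")).isNone →
    ∃ q ∈ PySem.List.pyRange 0 p 1,
      (PySem.Dict.mk branch_queues).getD
          ((PySem.List.pyGet? branches (PySem.Int.mod (start_idx + q) branches.length)).getD "") [] ≠ [] ∧
      ((PySem.List.pyGet? branches (PySem.Int.mod (start_idx + q) branches.length)).getD "") ∉ disallowed
instance (branches : List String) (branch_queues : List (String × List String)) (start_idx : Int) (disallowed : List String) : Decidable (Pre_pick_next_branch branches branch_queues start_idx disallowed) := by unfold Pre_pick_next_branch; infer_instance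

def pvWitness_pick_next_branch : List String × (List (String × List String)) × Int × List String :=
  (["a", "b"], [("a", []), ("b", ["s1"])], 3, ["b"])

def Spec_pick_next_branch (branches : List String) (branch_queues : List (String × List String)) (start_idx : Int) (disallowed : List String) (out : Option String × Int) : Prop := out = pick_next_branch_alt branches branch_queues start_idx disallowed
instance (branches : List String) (branch_queues : List (String × List String)) (start_idx : Int) (disallowed : List String) (out : Option String × Int) : Decidable (Spec_pick_next_branch branches branch_queues start_idx disallowed out) := by unfold Spec_pick_next_branch; infer_instance

-- ===== CLAIM (what is proved, stated in full; the proofs are below) =====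
def Claim_equal_pick_next_branch : Prop := ∀ (branches : List String) (branch_queues : List (String × List String)) (start_idx : Int) (disallowed : List String), Dom_pick_next_branch branches branch_queues start_idx disallowed → Pre_pick_next_branch branches branch_queues start_idx disallowed → Spec_pick_next_branch branches branch_queues start_idx disallowed (pick_next_branch branches branch_queues start_idx disallowed)

-- ===== LEMMAS AND PROOFS =====

-- the rotated scan order, as A's loop produces it: n indices starting at idx, stepping +1 mod total
def orderFrom (total : Int) : Int → Nat → List Int
  | _, 0 => []
  | idx, n + 1 => idx :: orderFrom total (PySem.Int.mod (idx + 1) total) n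

-- characterization of A's loop as the two passes over the scan order
theorem pickLoopA_char (branches : List String) (branch_queues : List (String × List String))
    (disallowed : List String) (total start_idx : Int) :
    ∀ (n : Nat) (idx : Int) (fb : Option (String × Int)),
    pickLoopA branches branch_queues disallowed total start_idx n idx fb =
      match pickPass1 branches branch_queues disallowed total (orderFrom total idx n) with
      | some (b, j) => (some b, j)
      | none =>
        match fb with
        | some (f, fi) => (some f, PySem.Int.mod (fi + 1) total)
        | none =>
          match pickPass2 branches branch_queues total (orderFrom total idx n) with
          | some (b, j) => (some b, j)
          | none => (none, start_idx) := by
  intro n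
  induction n with
  | zero => intro idx fb; simp [pickLoopA, orderFrom, pickPass1, pickPass2]
  | succ m ih =>
    intro idx fb
    simp only [pickLoopA, orderFrom, pickPass1, pickPass2, ih]
    rcases fb with _ | ⟨f, fi⟩ <;>
      by_cases hq : (PySem.Dict.mk branch_queues).getD ((PySem.List.pyGet? branches idx).getD "") [] = [] <;>
      by_cases hd : ((PySem.List.pyGet? branches idx).getD "") ∈ disallowed <;>
      simp [hq, hd]

-- stepping the rotated index commutes with taking the mod first
theorem mod_succ_mod (total s : Int) (ht : 0 < total) :
    PySem.Int.mod (PySem.Int.mod s total + 1) total = PySem.Int.mod (s + 1) total := by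
  simp only [PySem.Int.mod_eq_emod_of_pos ht]
  have h : s + 1 = s % total + 1 + total * (s / total) := by
    have := Int.emod_add_mul_ediv s total; linarith
  rw [h, Int.add_mul_emod_self_left]

theorem orderFrom_aux (total : Int) (ht : 0 < total) :
    ∀ (n : Nat) (s : Int),
      (List.range n).map (fun k : Nat => PySem.Int.mod (s + (k : Int)) total) =
        orderFrom total (PySem.Int.mod s total) n := by
  intro n
  induction n with
  | zero => intro s; simp [orderFrom]
  | succ m ih =>
    intro s
    rw [List.range_succ_eq_map, List.map_cons, List.map_map]
    simp only [orderFrom]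
    rw [mod_succ_mod total s ht, ← ih (s + 1)]
    have hf : ((fun k : Nat => PySem.Int.mod (s + (k : Int)) total) ∘ Nat.succ) =
        (fun k : Nat => PySem.Int.mod (s + 1 + (k : Int)) total) := by
      funext k
      simp only [Function.comp]
      congr 1
      push_cast
      ring
    rw [hf]
    simp

theorem orderFrom_eq_map_range (total start_idx : Int) (htot : 0 < total) :
    (PySem.List.pyRange 0 total 1).map (fun i => PySem.Int.mod (start_idx + i) total) =
      orderFrom total (PySem.Int.mod start_idx total) total.toNat := by
  rw [PySem.List.pyRange_one, List.map_map]
  have hf : ((fun i => PySem.Int.mod (start_idx + i) total) ∘ fun k : Nat => (0 : Int) + ↑k) =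
      (fun k : Nat => PySem.Int.mod (start_idx + (k : Int)) total) := by
    funext k; simp
  rw [hf]
  have := orderFrom_aux total htot total.toNat start_idx
  simpa using this

-- ===== VERDICT (by name: the statement is the Claim_ definition above) =====
theorem pick_next_branch_spec : Claim_equal_pick_next_branch := by
  intro branches branch_queues start_idx disallowed _hdom _hpre
  unfold Spec_pick_next_branch pick_next_branch pick_next_branch_alt
  by_cases hnil : branches = []
  · simp [hnil]
  · simp only [hnil, ite_false]
    rw [pickLoopA_char, orderFrom_eq_map_range _ _ (by simpa [List.length_pos_iff] using hnil)]
    simp
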